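-- pv_equiv track=rewrite | github.com/jordanhubbard/Theseus | cleanroom/python/theseus_netrc_cr/__init__.py | parse_netrc
-- ===== SOURCE A (Python) =====
-- import shlex
--
-- def parse_netrc(text):
--     """
--     Parse netrc format text string.
--     Returns a dict mapping host -> (login, account, password).
--     """
--     hosts = {}
--
--     # Tokenize using shlex to handle quoted strings and comments
--     try:
--         tokens = shlex.split(text, comments=True)
--     except ValueError:
--         # Fall back to simple splitting if shlex fails
--         tokens = text.split()
--
--     i = 0
--     while i < len(tokens):
--         token = tokens[i]
--
--         if token == 'machine':
--             if i + 1 >= len(tokens):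
--                 break
--             host = tokens[i + 1]
--             i += 2
--
--             login = None
--             account = None
--             password = None
--
--             # Parse key-value pairs until next machine/default/macdef
--             while i < len(tokens):
--                 key = tokens[i]
--                 if key in ('machine', 'default', 'macdef'):
--                     break
--                 elif key == 'login':
--                     if i + 1 < len(tokens):
--                         login = tokens[i + 1]
--                         i += 2
--                     else:
--                         i += 1
--                 elif key == 'account':
--                     if i + 1 < len(tokens):
--                         account = tokens[i + 1]
--                         i += 2
--                     else:
--                         i += 1
--                 elif key == 'password':
--                     if i + 1 < len(tokens):
--                         password = tokens[i + 1]
--                         i += 2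
--                     else:
--                         i += 1
--                 else:
--                     i += 1
--
--             hosts[host] = (login, account, password)
--
--         elif token == 'default':
--             i += 1
--             login = None
--             account = None
--             password = None
--
--             while i < len(tokens):
--                 key = tokens[i]
--                 if key in ('machine', 'default', 'macdef'):
--                     break
--                 elif key == 'login':
--                     if i + 1 < len(tokens):
--                         login = tokens[i + 1]
--                         i += 2
--                     else:
--                         i += 1
--                 elif key == 'account':
--                     if i + 1 < len(tokens):
--                         account = tokens[i + 1]
--                         i += 2
--                     else:
--                         i += 1
--                 elif key == 'password':
--                     if i + 1 < len(tokens):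
--                         password = tokens[i + 1]
--                         i += 2
--                     else:
--                         i += 1
--                 else:
--                     i += 1
--
--             hosts['default'] = (login, account, password)
--
--         elif token == 'macdef':
--             # Skip macdef block - consume until blank line
--             # In token mode, just skip the name and move on
--             i += 2  # skip 'macdef' and the macro name
--
--         else:
--             i += 1
--
--     return hosts
-- ===== SOURCE B (Python) =====
-- def _skip_line(text, i):
--     """Index just past the next newline (skip a '#' comment)."""
--     while i < len(text) and text[i] != '\n':
--         i += 1
--     return i + 1 if i < len(text) else i
--
--
-- def _shlex_split(text):
--     """shlex.split(text, comments=True) as a flat state machine.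
--
--     POSIX rules: whitespace separates tokens, '#' starts a comment to end of
--     line, '...' quotes literally, "..." quotes with backslash escaping only
--     \\ and ", a backslash outside quotes escapes the next character.
--     Returns None where shlex raises ValueError (unterminated quote/escape).
--     """
--     st = 'sp'
--     tok = []
--     quoted = False
--     acc = []
--     i = 0
--     n = len(text)
--
--     def emit():
--         nonlocal tok, quoted
--         if tok or quoted:
--             acc.append(''.join(tok))
--         tok = []
--         quoted = False
--
--     while i < n:
--         c = text[i]
--         i += 1
--         if st == 'sp':
--             if c in ' \t\r\n':
--                 pass
--             elif c == '#':
--                 i = _skip_line(text, i)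
--             elif c == '\\':
--                 st = 'escA'
--             elif c == "'":
--                 st = 'sq'
--             elif c == '"':
--                 st = 'dq'
--             else:
--                 tok = [c]
--                 st = 'word'
--         elif st == 'word':
--             if c in ' \t\r\n':
--                 emit()
--                 st = 'sp'
--             elif c == '#':
--                 emit()
--                 i = _skip_line(text, i)
--                 st = 'sp'
--             elif c == "'":
--                 st = 'sq'
--             elif c == '"':
--                 st = 'dq'
--             elif c == '\\':
--                 st = 'escA'
--             else:
--                 tok.append(c)
--         elif st == 'sq':
--             quoted = True
--             if c == "'":
--                 st = 'word'
--             else: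
--                 tok.append(c)
--         elif st == 'dq':
--             quoted = True
--             if c == '"':
--                 st = 'word'
--             elif c == '\\':
--                 st = 'escDq'
--             else:
--                 tok.append(c)
--         elif st == 'escA':
--             tok.append(c)
--             st = 'word'
--         else:  # escDq: inside "...", backslash escapes only '\' and '"'
--             if c != '\\' and c != '"':
--                 tok.append('\\')
--             tok.append(c)
--             st = 'dq'
--
--     if st == 'sp':
--         return acc
--     if st == 'word':
--         emit()
--         return acc
--     return None  # unterminated quote or escape -> ValueError in shlex
--
--
-- def parse_netrc(text):
--     """
--     Parse netrc format text string.
--     Returns a dict mapping host -> (login, account, password).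
--     """
--     tokens = _shlex_split(text)
--     if tokens is None:
--         tokens = text.split()
--
--     hosts = {}
--     current = None  # the mutable 3-slot record of the open entry, or None
--     FIELD = {'login': 0, 'account': 1, 'password': 2}
--
--     i = 0
--     n = len(tokens)
--     while i < n:
--         tok = tokens[i]
--         if tok == 'machine':
--             if i + 1 < n:
--                 current = [None, None, None]
--                 hosts[tokens[i + 1]] = current
--                 i += 2
--             else:
--                 i += 1
--         elif tok == 'default':
--             current = [None, None, None]
--             hosts['default'] = current
--             i += 1
--         elif tok == 'macdef':
--             current = None
--             i += 2
--         elif tok in FIELD and current is not None: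
--             if i + 1 < n:
--                 current[FIELD[tok]] = tokens[i + 1]
--                 i += 2
--             else:
--                 i += 1
--         else:
--             i += 1
--
--     return {h: tuple(r) for h, r in hosts.items()}
-- ===== Notes on version B (the rewrite author's own statement) =====
-- stated objective: faster
-- what changed: A's outer loop with two duplicated inner key/value while-loops is replaced by a single flat scan over the tokens that keeps the currently open record and updates it in place inside the hosts dict; B also inlines the shlex.split(comments=True) tokenization as a direct index-based state machine over the string instead of shlex's per-character StringIO reads.
import Mathlib
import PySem

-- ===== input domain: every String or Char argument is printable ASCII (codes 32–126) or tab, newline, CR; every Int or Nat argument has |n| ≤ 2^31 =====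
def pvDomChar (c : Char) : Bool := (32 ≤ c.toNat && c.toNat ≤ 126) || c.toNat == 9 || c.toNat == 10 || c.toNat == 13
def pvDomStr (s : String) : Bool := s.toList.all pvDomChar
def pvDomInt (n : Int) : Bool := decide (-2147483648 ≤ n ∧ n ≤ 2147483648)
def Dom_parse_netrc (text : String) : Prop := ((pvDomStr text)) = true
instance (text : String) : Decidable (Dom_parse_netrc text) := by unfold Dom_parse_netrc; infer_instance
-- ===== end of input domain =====

-- B replaces A's outer loop with two duplicated inner field loops by one flat token scan that
-- keeps the key of the open record and updates the hosts dict in place, and tokenizes with a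
-- direct index scan instead of shlex (objective: faster; measured).
-- A calls shlex.split(text, comments=True) with a text.split() fallback on ValueError; B inlines
-- the same tokenization as an explicit state machine (_shlex_split in Source B, exact for shlex's
-- POSIX mode with whitespace_split=True and comments='#'). Both tokenizations are the state
-- machine below, ported once by hand and shared by the two ports.

-- ===== SHARED TOKENIZER (port of `shlex.split(text, comments=True)`, with the
-- ===== `except ValueError: tokens = text.split()` fallback; used by both ports) =====

-- lexer states of shlex.read_token (posix, whitespace_split): ' ', word 'a', inside '…', inside "…",
-- escape with escapedstate 'a', escape with escapedstate '"'
inductive PvLexSt : Type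
  | sp | word | sq | dq | escA | escDq
deriving DecidableEq, Repr

def pvIsWs (c : Char) : Bool := c = ' ' || c = '\t' || c = '\r' || c = '\n'

-- self.instream.readline(): consume up to and including the next '\n'
def pvSkipLine (cs : List Char) : List Char :=
  match cs.dropWhile (· ≠ '\n') with
  | [] => []
  | _ :: r => r

theorem pvSkipLine_length_le (cs : List Char) : (pvSkipLine cs).length ≤ cs.length := by
  unfold pvSkipLine
  split
  · simp
  · rename_i r h
    have h1 : (cs.dropWhile (· ≠ '\n')).length ≤ cs.length := List.length_dropWhile_le _ _
    rw [h] at h1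
    simp at h1
    omega

-- emit the finished token iff it is nonempty or was quoted (shlex: `if self.token or (posix and quoted)`)
def pvEmit (acc : List String) (tok : List Char) (quoted : Bool) : List String :=
  if tok ≠ [] ∨ quoted = true then acc ++ [String.ofList tok] else acc

-- the read_token state machine, run over the whole stream; `none` = ValueError
-- ("No closing quotation" / "No escaped character" at EOF in a quote/escape state)
def pvShlexLoop (cs : List Char) (st : PvLexSt) (tok : List Char) (quoted : Bool)
    (acc : List String) : Option (List String) :=
  match cs with
  | [] =>
    match st with
    | .sp => some acc
    | .word => some (pvEmit acc tok quoted)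
    | _ => none
  | c :: rest =>
    match st with
    | .sp =>
      if pvIsWs c then pvShlexLoop rest .sp [] false acc
      else if c = '#' then pvShlexLoop (pvSkipLine rest) .sp [] false acc
      else if c = '\\' then pvShlexLoop rest .escA [] false acc
      else if c = '\'' then pvShlexLoop rest .sq [] false acc
      else if c = '"' then pvShlexLoop rest .dq [] false acc
      else pvShlexLoop rest .word [c] false acc
    | .word =>
      if pvIsWs c then pvShlexLoop rest .sp [] false (pvEmit acc tok quoted)
      else if c = '#' then pvShlexLoop (pvSkipLine rest) .sp [] false (pvEmit acc tok quoted)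
      else if c = '\'' then pvShlexLoop rest .sq tok quoted acc
      else if c = '"' then pvShlexLoop rest .dq tok quoted acc
      else if c = '\\' then pvShlexLoop rest .escA tok quoted acc
      else pvShlexLoop rest .word (tok ++ [c]) quoted acc
    | .sq =>  -- quoted := True on any character seen in a quote state
      if c = '\'' then pvShlexLoop rest .word tok true acc
      else pvShlexLoop rest .sq (tok ++ [c]) true acc
    | .dq =>
      if c = '"' then pvShlexLoop rest .word tok true acc
      else if c = '\\' then pvShlexLoop rest .escDq tok true acc
      else pvShlexLoop rest .dq (tok ++ [c]) true acc
    | .escA => pvShlexLoop rest .word (tok ++ [c]) quoted acc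
    | .escDq =>  -- inside "…", backslash escapes only '\' and '"'; otherwise it stays
      pvShlexLoop rest .dq ((if c ≠ '\\' ∧ c ≠ '"' then tok ++ ['\\'] else tok) ++ [c]) quoted acc
  termination_by cs.length
  decreasing_by
    all_goals simp
    all_goals exact pvSkipLine_length_le rest

def pvShlexSplit? (text : String) : Option (List String) :=
  pvShlexLoop text.toList .sp [] false []

-- A: `try: tokens = shlex.split(...) except ValueError: tokens = text.split()`;
-- B: `tokens = _shlex_split(text)` then `if tokens is None: tokens = text.split()`
def pvTokens (text : String) : List String :=
  match pvShlexSplit? text with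
  | some ts => ts
  | none => PySem.Str.split₀ text

-- ===== PORT A =====

-- the inner `while i < len(tokens)` key/value loop (identical twice in A);
-- returns the finished (login, account, password) and the remaining tokens
def parseFieldsA (rest : List String) (login account password : Option String) :
    (Option String × Option String × Option String) × List String :=
  match rest with
  | [] => ((login, account, password), [])
  | key :: rest' =>
    if key = "machine" ∨ key = "default" ∨ key = "macdef" then
      ((login, account, password), key :: rest')
    else if key = "login" then
      match rest' with
      | v :: rest'' => parseFieldsA rest'' (some v) account password
      | [] => ((login, account, password), [])       -- i += 1, loop ends
    else if key = "account" then
      match rest' with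
      | v :: rest'' => parseFieldsA rest'' login (some v) password
      | [] => ((login, account, password), [])
    else if key = "password" then
      match rest' with
      | v :: rest'' => parseFieldsA rest'' login account (some v)
      | [] => ((login, account, password), [])
    else parseFieldsA rest' login account password

theorem parseFieldsA_length_le (rest : List String) (l a p : Option String) :
    (parseFieldsA rest l a p).2.length ≤ rest.length := by
  fun_induction parseFieldsA rest l a p <;> simp_all <;> omega

-- the outer `while i < len(tokens)` loop of A
def parseOuterA (rest : List String)
    (hosts : PySem.Dict String (Option String × Option String × Option String)) :
    PySem.Dict String (Option String × Option String × Option String) :=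
  match rest with
  | [] => hosts
  | token :: rest' =>
    if token = "machine" then
      match rest' with
      | [] => hosts                                  -- break
      | host :: rest'' =>
        let r := parseFieldsA rest'' none none none
        parseOuterA r.2 (hosts.insert host r.1)
    else if token = "default" then
      let r := parseFieldsA rest' none none none
      parseOuterA r.2 (hosts.insert "default" r.1)
    else if token = "macdef" then
      parseOuterA (rest'.drop 1) hosts               -- i += 2
    else
      parseOuterA rest' hosts
  termination_by rest.length
  decreasing_by
    · have := parseFieldsA_length_le rest'' none none none
      simp
      omega
    · have := parseFieldsA_length_le rest' none none none
      simp
      omega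
    · simp
    · simp

def parse_netrc (text : String) :
    List (String × Option String × Option String × Option String) :=
  (parseOuterA (pvTokens text) PySem.Dict.empty).items

-- ===== PORT B =====

-- `current[FIELD[tok]] = value` on the 3-slot record
def pvSetField (tok : String) (v : String)
    (r : Option String × Option String × Option String) :
    Option String × Option String × Option String :=
  if tok = "login" then (some v, r.2.1, r.2.2)
  else if tok = "account" then (r.1, some v, r.2.2)
  else (r.1, r.2.1, some v)

-- B's single flat scan: hosts plus the key of the currently open record
def loopB (rest : List String)
    (hosts : PySem.Dict String (Option String × Option String × Option String))
    (cur : Option String) :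
    PySem.Dict String (Option String × Option String × Option String) :=
  match rest with
  | [] => hosts
  | tok :: rest' =>
    if tok = "machine" then
      match rest' with
      | host :: rest'' =>
        loopB rest'' (hosts.insert host (none, none, none)) (some host)
      | [] => loopB [] hosts cur                     -- i += 1, loop then ends
    else if tok = "default" then
      loopB rest' (hosts.insert "default" (none, none, none)) (some "default")
    else if tok = "macdef" then
      loopB (rest'.drop 1) hosts none
    else if tok = "login" ∨ tok = "account" ∨ tok = "password" then
      match cur with
      | some h =>
        match rest' with
        | v :: rest'' =>
          loopB rest'' (hosts.modify h (none, none, none) (pvSetField tok v)) cur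
        | [] => loopB [] hosts cur
      | none => loopB rest' hosts cur
    else
      loopB rest' hosts cur
  termination_by rest.length
  decreasing_by all_goals simp

def parse_netrc_alt (text : String) :
    List (String × Option String × Option String × Option String) :=
  (loopB (pvTokens text) PySem.Dict.empty none).items

-- ===== PRECONDITION & SPEC =====
def Spec_parse_netrc (text : String) (out : List (String × Option String × Option String × Option String)) : Prop := out = parse_netrc_alt text
instance (text : String) (out : List (String × Option String × Option String × Option String)) : Decidable (Spec_parse_netrc text out) := by unfold Spec_parse_netrc; infer_instance

-- ===== CLAIM (what is proved, stated in full; the proofs are below) =====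
def Claim_equal_parse_netrc : Prop := ∀ (text : String), Dom_parse_netrc text → Spec_parse_netrc text (parse_netrc text)

-- ===== LEMMAS AND PROOFS =====

-- mutating a record that was just installed = installing the mutated record
theorem pvModifyInsert {ν : Type} (d : PySem.Dict String ν) (k : String) (v d0 : ν) (f : ν → ν) :
    (d.insert k v).modify k d0 f = d.insert k (f v) := by
  simp [PySem.Dict.modify, PySem.Dict.getD_insert_self, PySem.Dict.insert_insert_self]

-- `rest` starts (if at all) with a token on which A's inner loop breaks
def pvBreakHead : List String → Prop
  | [] => True
  | t :: _ => t = "machine" ∨ t = "default" ∨ t = "macdef"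

-- the joint loop invariant: outside a record (or at a break token) B's flat scan agrees with
-- A's outer loop, and inside a record with key h it agrees with A's inner loop followed by
-- `hosts[host] = (login, account, password)` and the outer loop on the rest
theorem pvLoops (n : Nat) : ∀ (rest : List String), rest.length ≤ n →
    (∀ (D : PySem.Dict String (Option String × Option String × Option String)) cur,
      (cur = none ∨ pvBreakHead rest) → loopB rest D cur = parseOuterA rest D) ∧
    (∀ (D : PySem.Dict String (Option String × Option String × Option String)) (h : String) (l a p : Option String),
      loopB rest (D.insert h (l, a, p)) (some h) =
        parseOuterA (parseFieldsA rest l a p).2 (D.insert h (parseFieldsA rest l a p).1)) := by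
  induction n with
  | zero =>
    intro rest hlen
    have : rest = [] := List.eq_nil_of_length_eq_zero (Nat.le_zero.mp hlen)
    subst this
    constructor
    · intro D cur _
      simp [loopB, parseOuterA]
    · intro D h l a p
      simp [loopB, parseOuterA, parseFieldsA]
  | succ n ih =>
    intro rest hlen
    match rest with
    | [] =>
      constructor
      · intro D cur _
        simp [loopB, parseOuterA]
      · intro D h l a p
        simp [loopB, parseOuterA, parseFieldsA]
    | tok :: rest' =>
      simp only [List.length_cons] at hlen
      have hP : ∀ (D : PySem.Dict String (Option String × Option String × Option String)) cur,
          (cur = none ∨ pvBreakHead (tok :: rest')) →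
          loopB (tok :: rest') D cur = parseOuterA (tok :: rest') D := by
        intro D cur hcur
        by_cases hm : tok = "machine"
        · subst hm
          match rest' with
          | [] => rw [loopB.eq_def, parseOuterA.eq_def]; simp [loopB]
          | host :: rest'' =>
            rw [loopB.eq_def, parseOuterA.eq_def]
            simp only [reduceIte]
            exact (ih rest'' (by simp at hlen; omega)).2 D host none none none
        · by_cases hd : tok = "default"
          · subst hd
            rw [loopB.eq_def, parseOuterA.eq_def]
            simp only [reduceIte]
            exact (ih rest' (by simp at hlen; omega)).2 D "default" none none none
          · by_cases hmac : tok = "macdef"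
            · subst hmac
              rw [loopB.eq_def, parseOuterA.eq_def]
              simp only [reduceIte]
              exact (ih (rest'.drop 1) (by simp at hlen ⊢; omega)).1 D none (Or.inl rfl)
            · have hcur' : cur = none := by
                rcases hcur with h | h
                · exact h
                · simp [pvBreakHead, hm, hd, hmac] at h
              subst hcur'
              rw [loopB.eq_def, parseOuterA.eq_def]
              simp only [hm, hd, hmac, if_false]
              by_cases hf : tok = "login" ∨ tok = "account" ∨ tok = "password"
              · simp only [hf, if_true]
                exact (ih rest' (by simp at hlen; omega)).1 D none (Or.inl rfl)
              · simp only [hf, if_false]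
                exact (ih rest' (by simp at hlen; omega)).1 D none (Or.inl rfl)
      refine ⟨hP, ?_⟩
      intro D h l a p
      by_cases hbrk : tok = "machine" ∨ tok = "default" ∨ tok = "macdef"
      · rw [show parseFieldsA (tok :: rest') l a p = ((l, a, p), tok :: rest') by
          rw [parseFieldsA.eq_def]; simp [hbrk]]
        exact hP (D.insert h (l, a, p)) (some h) (Or.inr (by simpa [pvBreakHead] using hbrk))
      · push Not at hbrk
        obtain ⟨hm, hd, hmac⟩ := hbrk
        by_cases hl : tok = "login"
        · subst hl
          match rest' with
          | [] =>
            rw [loopB.eq_def, parseFieldsA.eq_def]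
            simp [loopB, parseOuterA]
          | v :: rest'' =>
            rw [loopB.eq_def, parseFieldsA.eq_def]
            simp only [hm, hd, hmac, if_false, true_or, if_pos]
            rw [pvModifyInsert]
            have hsf : pvSetField "login" v (l, a, p) = (some v, a, p) := by
              simp [pvSetField]
            rw [hsf]
            exact (ih rest'' (by simp at hlen; omega)).2 D h (some v) a p
        · by_cases ha : tok = "account"
          · subst ha
            match rest' with
            | [] =>
              rw [loopB.eq_def, parseFieldsA.eq_def]
              simp [loopB, parseOuterA]
            | v :: rest'' =>
              rw [loopB.eq_def, parseFieldsA.eq_def]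
              simp only [hm, hd, hmac, hl, if_false, or_true, true_or, if_pos]
              rw [pvModifyInsert]
              have hsf : pvSetField "account" v (l, a, p) = (l, some v, p) := by
                simp [pvSetField]
              rw [hsf]
              exact (ih rest'' (by simp at hlen; omega)).2 D h l (some v) p
          · by_cases hp : tok = "password"
            · subst hp
              match rest' with
              | [] =>
                rw [loopB.eq_def, parseFieldsA.eq_def]
                simp [loopB, parseOuterA]
              | v :: rest'' =>
                rw [loopB.eq_def, parseFieldsA.eq_def]
                simp only [hm, hd, hmac, hl, ha, if_false, or_true, if_pos]
                rw [pvModifyInsert]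
                have hsf : pvSetField "password" v (l, a, p) = (l, a, some v) := by
                  simp [pvSetField]
                rw [hsf]
                exact (ih rest'' (by simp at hlen; omega)).2 D h l a (some v)
            · rw [loopB.eq_def, parseFieldsA.eq_def]
              simp only [hm, hd, hmac, hl, ha, hp, if_false, or_self]
              exact (ih rest' (by simp at hlen; omega)).2 D h l a p

-- ===== VERDICT (by name: the statement is the Claim_ definition above) =====
theorem parse_netrc_spec : Claim_equal_parse_netrc := by
  intro text _
  unfold Spec_parse_netrc parse_netrc parse_netrc_alt
  rw [(pvLoops (pvTokens text).length (pvTokens text) le_rfl).1 PySem.Dict.empty none (Or.inl rfl)]
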